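-- pv_equiv track=rewrite | github.com/WDC-GP/GUST-MARK-1 | utils/data/validation_helpers.py | validate_request_data
-- ===== SOURCE A (Python) =====
-- from typing import Dict, List, Optional, Union, Tuple
--
-- def validate_request_data(data: Dict, required_fields: List[str]) -> Tuple[bool, str, Dict]:
--     """
--     Validate request data has required fields
--
--     Args:
--         data: Request data dictionary
--         required_fields: List of required field names
--
--     Returns:
--         Tuple of (is_valid, error_message, cleaned_data)
--     """
--     if not isinstance(data, dict):
--         return False, "Request data must be a dictionary", {}
--
--     cleaned_data = {}
--     missing_fields = []
--
--     for field in required_fields: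
--         if field not in data:
--             missing_fields.append(field)
--         else:
--             # Basic cleaning - strip strings
--             value = data[field]
--             if isinstance(value, str):
--                 value = value.strip()
--             cleaned_data[field] = value
--
--     if missing_fields:
--         return False, f"Missing required fields: {', '.join(missing_fields)}", {}
--
--     return True, "", cleaned_data
-- ===== SOURCE B (Python) =====
-- def validate_request_data(data, required_fields):
--     """Validate request data has required fields (early-exit index scan)."""
--     if not isinstance(data, dict):
--         return False, "Request data must be a dictionary", {}
--     cleaned = {}
--     i, n = 0, len(required_fields)
--     # advance while fields are present, cleaning as we go; stop at first missing field
--     while i < n and required_fields[i] in data: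
--         f = required_fields[i]
--         v = data[f]
--         cleaned[f] = v.strip() if isinstance(v, str) else v
--         i += 1
--     if i == n:
--         return True, "", cleaned
--     missing = [f for f in required_fields[i:] if f not in data]
--     return False, "Missing required fields: " + ", ".join(missing), {}
-- ===== Notes on version B (the rewrite author's own statement) =====
-- stated objective: alternative
-- what changed: Replaces A's single full pass that interleaves cleaning with missing-field collection by an early-exit index scan: a while loop cleans fields only up to the first missing one, and only on failure a separate tail scan over the remaining suffix collects the missing names for the error message.
import Mathlib
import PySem

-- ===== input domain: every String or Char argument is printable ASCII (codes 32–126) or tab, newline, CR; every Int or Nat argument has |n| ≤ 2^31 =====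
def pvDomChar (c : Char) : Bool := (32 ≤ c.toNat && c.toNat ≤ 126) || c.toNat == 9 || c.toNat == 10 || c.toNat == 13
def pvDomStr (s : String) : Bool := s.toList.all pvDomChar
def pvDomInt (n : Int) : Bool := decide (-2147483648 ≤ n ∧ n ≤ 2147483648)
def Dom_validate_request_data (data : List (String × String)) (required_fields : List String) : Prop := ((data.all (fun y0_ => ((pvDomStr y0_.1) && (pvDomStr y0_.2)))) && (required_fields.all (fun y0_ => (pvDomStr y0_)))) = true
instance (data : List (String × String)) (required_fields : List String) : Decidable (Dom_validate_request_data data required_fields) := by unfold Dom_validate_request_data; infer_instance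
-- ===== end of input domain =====

-- B replaces A's single full interleaved pass by an early-exit scan: it cleans fields only up to
-- the first missing one and, only on failure, collects the missing names from the remaining suffix;
-- objective: alternative (same cost, different control flow).

-- ===== PORT A =====
-- literal transliteration of A's single loop: one pass accumulating (cleaned_data, missing_fields).
-- (values are typed String here, so Python's 'isinstance(value, str)' branch always strips)
def validate_request_data (data : List (String × String)) (required_fields : List String) : Bool × String × (List (String × String)) :=
  let d := PySem.Dict.ofList data
  let st := required_fields.foldl
    (fun (st : PySem.Dict String String × List String) f =>
      if d.contains f = false then (st.1, st.2 ++ [f])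
      else (st.1.insert f (PySem.Str.strip ((d.get? f).getD "")), st.2))
    (PySem.Dict.empty, [])
  if st.2.isEmpty then (true, "", st.1.items)
  else (false, "Missing required fields: " ++ PySem.Str.join ", " st.2, [])

-- ===== PORT B =====
-- Source B's 'while i < n and required_fields[i] in data' index loop, ported exactly as structural
-- recursion on the remaining suffix required_fields[i:]; it returns the cleaned dict built so far
-- together with the untouched suffix at which the loop stopped.
def pvWhileScan (d : PySem.Dict String String) : List String → PySem.Dict String String → PySem.Dict String String × List String
  | [], cleaned => (cleaned, [])
  | f :: rest, cleaned =>
    if d.contains f then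
      pvWhileScan d rest (cleaned.insert f (PySem.Str.strip ((d.get? f).getD "")))
    else (cleaned, f :: rest)

def validate_request_data_alt (data : List (String × String)) (required_fields : List String) : Bool × String × (List (String × String)) :=
  let d := PySem.Dict.ofList data
  let p := pvWhileScan d required_fields PySem.Dict.empty
  if p.2.isEmpty then (true, "", p.1.items)
  else (false, "Missing required fields: " ++ PySem.Str.join ", " (p.2.filter (fun f => !(d.contains f))), [])

-- ===== PRECONDITION & SPEC =====
def Spec_validate_request_data (data : List (String × String)) (required_fields : List String) (out : Bool × String × (List (String × String))) : Prop := out = validate_request_data_alt data required_fields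
instance (data : List (String × String)) (required_fields : List String) (out : Bool × String × (List (String × String))) : Decidable (Spec_validate_request_data data required_fields out) := by unfold Spec_validate_request_data; infer_instance

-- ===== CLAIM (what is proved, stated in full; the proofs are below) =====
def Claim_equal_validate_request_data : Prop := ∀ (data : List (String × String)) (required_fields : List String), Dom_validate_request_data data required_fields → Spec_validate_request_data data required_fields (validate_request_data data required_fields)

-- ===== LEMMAS AND PROOFS =====

-- A's interleaved loop splits into a conditional-insert fold and the filter of uncontained fields.
theorem foldA_split (d : PySem.Dict String String) (rf : List String)
    (c : PySem.Dict String String) (m : List String) :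
    rf.foldl
      (fun (st : PySem.Dict String String × List String) f =>
        if d.contains f = false then (st.1, st.2 ++ [f])
        else (st.1.insert f (PySem.Str.strip ((d.get? f).getD "")), st.2))
      (c, m)
    = (rf.foldl
        (fun (cd : PySem.Dict String String) f =>
          if d.contains f then cd.insert f (PySem.Str.strip ((d.get? f).getD "")) else cd) c,
       m ++ rf.filter (fun f => !(d.contains f))) := by
  induction rf generalizing c m with
  | nil => simp
  | cons f rf ih =>
    by_cases h : d.contains f
    · simp [List.foldl_cons, h, ih]
    · simp only [Bool.not_eq_true] at h
      simp [List.foldl_cons, h, ih]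

-- B's early-exit scan, followed by Source B's post-processing, computes exactly the
-- "filter the missing fields / fold the conditional inserts" result A's split yields.
theorem whileScan_post (d : PySem.Dict String String) (rf : List String)
    (c : PySem.Dict String String) :
    (let p := pvWhileScan d rf c;
     if p.2.isEmpty then (true, "", p.1.items)
     else (false, "Missing required fields: " ++ PySem.Str.join ", " (p.2.filter (fun f => !(d.contains f))), []))
    = (if (rf.filter (fun f => !(d.contains f))).isEmpty then
        (true, "",
          (rf.foldl (fun (cd : PySem.Dict String String) f =>
            if d.contains f then cd.insert f (PySem.Str.strip ((d.get? f).getD "")) else cd) c).items)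
       else (false, "Missing required fields: " ++ PySem.Str.join ", " (rf.filter (fun f => !(d.contains f))), [])) := by
  induction rf generalizing c with
  | nil => simp [pvWhileScan]
  | cons f rf ih =>
    by_cases h : d.contains f
    · simp only [pvWhileScan, h, if_pos, List.filter_cons, Bool.not_true, List.foldl_cons]
      exact ih _
    · simp only [Bool.not_eq_true] at h
      simp [pvWhileScan, h]

-- ===== VERDICT (by name: the statement is the Claim_ definition above) =====
theorem validate_request_data_spec : Claim_equal_validate_request_data := by
  intro data rf _
  show _ = _
  unfold validate_request_data validate_request_data_alt
  simp only [foldA_split, List.nil_append, whileScan_post]
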